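-- pv_equiv track=rewrite | github.com/strongcookdas/algorithm | string/프로그래머스_외톨이알파벳.py | solution
-- ===== SOURCE A (Python) =====
-- import collections
--
-- def solution(input_string):
--     answer = ''
--     char_dict = collections.defaultdict(int)
--     prev = None
--     for cur in input_string:
--         if cur != prev:
--             char_dict[cur] += 1
--         prev = cur
--     for key, value in char_dict.items():
--         if value > 1:
--             answer += key
--     return "".join(sorted(answer)) if answer != "" else 'N'
-- ===== SOURCE B (Python) =====
-- def solution(input_string):
--     # A character is "lonely" iff its occurrences are not one contiguous block,
--     # i.e. the span from its first to its last occurrence is longer than its count.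
--     stats = {}  # char -> [first index, last index, count]
--     for i, c in enumerate(input_string):
--         if c in stats:
--             s = stats[c]
--             s[1] = i
--             s[2] += 1
--         else:
--             stats[c] = [i, i, 1]
--     lonely = sorted(c for c, (f, l, n) in stats.items() if l - f + 1 > n)
--     return ''.join(lonely) if lonely else 'N'
-- ===== Notes on version B (the rewrite author's own statement) =====
-- stated objective: alternative
-- what changed: Drops the run-detection entirely: instead of comparing each character with its predecessor to count runs, B records first index, last index and count per character in one pass and tests whether the occupied span exceeds the count (occurrences non-contiguous iff the letter starts 2+ runs).
import Mathlib
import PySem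

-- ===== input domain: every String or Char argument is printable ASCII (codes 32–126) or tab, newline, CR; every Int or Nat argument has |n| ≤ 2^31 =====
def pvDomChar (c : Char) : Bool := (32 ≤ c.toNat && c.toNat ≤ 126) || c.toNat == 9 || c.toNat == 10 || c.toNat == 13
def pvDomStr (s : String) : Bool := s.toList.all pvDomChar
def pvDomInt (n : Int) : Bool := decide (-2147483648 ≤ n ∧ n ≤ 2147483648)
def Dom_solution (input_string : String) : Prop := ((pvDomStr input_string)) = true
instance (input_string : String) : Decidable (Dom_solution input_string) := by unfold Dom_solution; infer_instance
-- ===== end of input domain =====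

-- B drops A's run detection: instead of comparing each character with its predecessor to
-- count runs, it records first index / last index / count per character and tests whether
-- the occupied span exceeds the count (objective: alternative algorithm, same cost).

-- ===== PORT A =====
-- one loop step: 'if cur != prev: char_dict[cur] += 1; prev = cur'
def stepA (st : PySem.Dict Char Int × Option Char) (cur : Char) :
    PySem.Dict Char Int × Option Char :=
  (if some cur ≠ st.2 then st.1.modify cur 0 (· + 1) else st.1, some cur)

def solution (input_string : String) : String :=
  let res := input_string.toList.foldl stepA (PySem.Dict.empty, none)
  let answer := res.1.items.foldl
    (fun acc kv => if kv.2 > 1 then acc ++ [kv.1] else acc) ([] : List Char)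
  if answer ≠ [] then String.ofList (PySem.List.sorted answer (fun c => c) false) else "N"

-- ===== PORT B =====
-- one loop step over enumerate: keep (first, last, count) per character
def stepB (d : PySem.Dict Char (Int × Int × Int)) (p : Int × Char) :
    PySem.Dict Char (Int × Int × Int) :=
  if d.contains p.2 then d.modify p.2 (0, 0, 0) (fun s => (s.1, p.1, s.2.2 + 1))
  else d.insert p.2 (p.1, p.1, 1)

def solution_alt (input_string : String) : String :=
  let stats := (PySem.List.enumerate input_string.toList 0).foldl stepB PySem.Dict.empty
  let lonely := PySem.List.sorted
    ((stats.items.filter (fun p => p.2.2.1 - p.2.1 + 1 > p.2.2.2)).map (·.1))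
    (fun c => c) false
  if lonely ≠ [] then String.ofList lonely else "N"

-- ===== PRECONDITION & SPEC =====
def Spec_solution (input_string : String) (out : String) : Prop := out = solution_alt input_string
instance (input_string : String) (out : String) : Decidable (Spec_solution input_string out) := by unfold Spec_solution; infer_instance

-- ===== CLAIM =====
def Claim_equal_solution : Prop := ∀ (input_string : String), Dom_solution input_string → Spec_solution input_string (solution input_string)

-- ===== LEMMAS AND PROOFS =====

-- the run-head characters of l when the previous character was `prev` (invariant of A's loop)
def headsFrom (prev : Option Char) : List Char → List Char
  | [] => []
  | c :: rest => if some c ≠ prev then c :: headsFrom (some c) rest else headsFrom (some c) rest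

-- A's fused loop counts exactly the run heads
lemma foldA_fst (l : List Char) (d : PySem.Dict Char Int) (prev : Option Char) :
    (l.foldl stepA (d, prev)).1
      = (headsFrom prev l).foldl (fun d x => d.modify x 0 (· + 1)) d := by
  induction l generalizing d prev with
  | nil => rfl
  | cons c rest ih =>
    simp only [List.foldl, stepA, headsFrom]
    split_ifs with h
    · simp [ih]
    · simp [ih]

-- index of the first occurrence of c (junk 0 when c is absent)
def idxN (c : Char) : List Char → Nat
  | [] => 0
  | x :: r => if x = c then 0 else idxN c r + 1

-- index of the last occurrence of c (junk 0 when c is absent)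
def lastN (c : Char) : List Char → Nat
  | [] => 0
  | _ :: r => if c ∈ r then lastN c r + 1 else 0

-- number of runs of c; `near` = the previous character was c (a run is open)
def runsN (c : Char) (near : Bool) : List Char → Nat
  | [] => 0
  | x :: r => if x = c then (if near then runsN c true r else runsN c true r + 1)
              else runsN c false r

lemma runsN_eq_zero_of_not_mem {c : Char} {l : List Char} (h : c ∉ l) (b : Bool) :
    runsN c b l = 0 := by
  induction l generalizing b with
  | nil => rfl
  | cons x r ih =>
    simp only [List.mem_cons, not_or] at h
    simp [runsN, Ne.symm h.1, ih h.2]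

lemma one_le_runsN_of_mem {c : Char} {l : List Char} (h : c ∈ l) :
    1 ≤ runsN c false l := by
  induction l with
  | nil => simp at h
  | cons x r ih =>
    by_cases hx : x = c
    · simp [runsN, hx]
    · simp only [List.mem_cons] at h
      rcases h with h | h
      · exact absurd h.symm hx
      · simpa [runsN, hx] using ih h

lemma count_le_lastN {c : Char} {l : List Char} (h : c ∈ l) :
    l.count c ≤ lastN c l + 1 := by
  induction l with
  | nil => simp at h
  | cons x r ih =>
    by_cases hr : c ∈ r
    · have h1 := ih hr
      have hl : lastN c (x :: r) = lastN c r + 1 := by simp [lastN, hr]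
      by_cases hx : x = c
      · have hcc : (x :: r).count c = r.count c + 1 := by simp [hx]
        rw [hl, hcc]; omega
      · have hcc : (x :: r).count c = r.count c := by
          simp [List.count_cons, beq_iff_eq, hx, Ne.symm hx]
        rw [hl, hcc]; omega
    · rcases List.mem_cons.mp h with h1 | h1
      · have hcc : (x :: r).count c = 1 := by
          simp [h1.symm, List.count_eq_zero_of_not_mem hr]
        rw [hcc]; omega
      · exact absurd h1 hr

-- counting c among the run heads is counting c's runs
lemma count_headsFrom (c : Char) (l : List Char) (p : Option Char) :
    (headsFrom p l).count c = runsN c (p == some c) l := by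
  induction l generalizing p with
  | nil => rfl
  | cons x r ih =>
    by_cases hp : some x = p
    · by_cases hx : x = c
      · have hb : (p == some c) = true := by simp [← hp, hx]
        have hb2 : ((some x : Option Char) == some c) = true := by simp [hx]
        rw [headsFrom, if_neg (by simp [hp]), ih, runsN, if_pos hx, hb, hb2, if_pos rfl]
      · have hb : (p == some c) = false := by simp [← hp, hx]
        have hb2 : ((some x : Option Char) == some c) = false := by simp [hx]
        rw [headsFrom, if_neg (by simp [hp]), ih, runsN, if_neg hx, hb2]
    · rw [headsFrom, if_pos (by simpa using hp)]
      by_cases hx : x = c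
      · have hb : (p == some c) = false := by
          simp [beq_iff_eq]
          intro hh; exact hp (hx ▸ hh.symm)
        have hb2 : ((some x : Option Char) == some c) = true := by simp [hx]
        rw [List.count_cons, ih, runsN, if_pos hx, hb]
        simp [hx]
      · have hb2 : ((some x : Option Char) == some c) = false := by simp [hx]
        rw [List.count_cons, ih, runsN, hb2]
        simp [hx, Ne.symm hx]

-- the core equivalence: c heads 2+ runs  ↔  its span exceeds its count
lemma runs_iff_span (c : Char) (l : List Char) :
    (c ∈ l → (1 ≤ runsN c true l ↔ l.count c < lastN c l + 1)) ∧
    (c ∈ l → (2 ≤ runsN c false l ↔ idxN c l + l.count c < lastN c l + 1)) := by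
  induction l with
  | nil => simp
  | cons x r ih =>
    by_cases hx : x = c
    · have hcount : (x :: r).count c = r.count c + 1 := by simp [hx]
      have hr1 : runsN c true (x :: r) = runsN c true r := by simp [runsN, hx]
      have hr2 : runsN c false (x :: r) = runsN c true r + 1 := by simp [runsN, hx]
      have hi : idxN c (x :: r) = 0 := by simp [idxN, hx]
      by_cases hr : c ∈ r
      · have h1 := ih.1 hr
        have hl : lastN c (x :: r) = lastN c r + 1 := by simp [lastN, hr]
        constructor
        · intro _; rw [hr1, hl, hcount]; omega
        · intro _; rw [hr2, hl, hcount, hi]; omega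
      · have hz : runsN c true r = 0 := runsN_eq_zero_of_not_mem hr true
        have hc0 : r.count c = 0 := List.count_eq_zero_of_not_mem hr
        have hl : lastN c (x :: r) = 0 := by simp [lastN, hr]
        constructor
        · intro _; rw [hr1, hl, hcount, hz, hc0]; omega
        · intro _; rw [hr2, hl, hcount, hi, hz, hc0]; omega
    · have hmem : c ∈ x :: r → c ∈ r := by
        intro hm
        rcases List.mem_cons.mp hm with h | h
        · exact absurd h.symm hx
        · exact h
      have hcc : (x :: r).count c = r.count c := by
        simp [List.count_cons, beq_iff_eq, hx, Ne.symm hx]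
      have hrt : runsN c true (x :: r) = runsN c false r := by simp [runsN, hx]
      have hrf : runsN c false (x :: r) = runsN c false r := by simp [runsN, hx]
      have hidx : idxN c (x :: r) = idxN c r + 1 := by simp [idxN, hx]
      constructor
      · intro hm
        have hr := hmem hm
        have hl : lastN c (x :: r) = lastN c r + 1 := by simp [lastN, hr]
        have hp := one_le_runsN_of_mem hr
        have hcl := count_le_lastN hr
        rw [hrt, hl, hcc]; omega
      · intro hm
        have hr := hmem hm
        have hl : lastN c (x :: r) = lastN c r + 1 := by simp [lastN, hr]
        have h2 := ih.2 hr
        rw [hrf, hl, hcc, hidx]; omega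

-- A's pre-sort answer list
def laList (l : List Char) : List Char :=
  ((PySem.Dict.counter (headsFrom none l)).items.filter (fun p => p.2 > 1)).map (·.1)

lemma laList_eq_filter (l : List Char) :
    laList l = (PySem.Set.ofList (headsFrom none l)).filter
      (fun c => decide (((headsFrom none l).count c : Int) > 1)) := by
  simp [laList, PySem.Dict.items_counter, List.filter_map, List.map_map, Function.comp_def]

lemma nodup_laList (l : List Char) : (laList l).Nodup := by
  rw [laList_eq_filter]
  exact (PySem.Set.nodup_ofList _).filter _

lemma mem_laList (c : Char) (l : List Char) :
    c ∈ laList l ↔ 2 ≤ (headsFrom none l).count c := by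
  rw [laList_eq_filter]
  simp only [List.mem_filter, PySem.Set.mem_ofList, decide_eq_true_eq]
  constructor
  · rintro ⟨_, h⟩; exact_mod_cast h
  · intro h
    refine ⟨List.count_pos_iff.mp (by omega), by exact_mod_cast h⟩

-- B's dict and pre-sort answer list
def lbDict (l : List Char) : PySem.Dict Char (Int × Int × Int) :=
  (PySem.List.enumerate l 0).foldl stepB PySem.Dict.empty

def lbList (l : List Char) : List Char :=
  ((lbDict l).items.filter (fun p => p.2.2.1 - p.2.1 + 1 > p.2.2.2)).map (·.1)

-- invariant of B's loop: the stored triple is (first, last, count)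
lemma get?_stepB (d : PySem.Dict Char (Int × Int × Int)) (s : Int) (x c : Char) :
    (stepB d (s, x)).get? c =
      if c = x then
        some (match d.get? x with
              | some v => (v.1, s, v.2.2 + 1)
              | none => (s, s, (1 : Int)))
      else d.get? c := by
  unfold stepB PySem.Dict.modify
  by_cases hcon : d.contains x
  · rw [if_pos hcon, PySem.Dict.get?_insert]
    cases hv : d.get? x with
    | some v =>
      rw [PySem.Dict.getD_eq_get?_getD, hv]
      by_cases hcx : c = x
      · rw [if_pos (show c = (s, x).2 from hcx), if_pos hcx]
        rfl
      · rw [if_neg (show ¬ c = (s, x).2 from hcx), if_neg hcx]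
    | none =>
      rw [PySem.Dict.contains_eq_isSome_get?, hv] at hcon
      simp at hcon
  · rw [if_neg hcon, PySem.Dict.get?_insert]
    have hv : d.get? x = none := by
      rw [PySem.Dict.contains_eq_isSome_get?] at hcon
      cases h : d.get? x with
      | none => rfl
      | some v => rw [h] at hcon; simp at hcon
    rw [hv]

-- invariant of B's loop: the stored triple is (first, last, count)
lemma foldB_get? (l : List Char) (s : Int) (d : PySem.Dict Char (Int × Int × Int)) (c : Char) :
    ((PySem.List.enumerate l s).foldl stepB d).get? c =
      match d.get? c with
      | some v => if c ∈ l then some (v.1, s + (lastN c l : Int), v.2.2 + (l.count c : Int))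
                  else some v
      | none => if c ∈ l then
                  some ((s + (idxN c l : Int), s + (lastN c l : Int), (l.count c : Int)))
                else none := by
  induction l generalizing s d with
  | nil =>
    simp only [PySem.List.enumerate_nil, List.foldl_nil, List.not_mem_nil, if_false]
    cases d.get? c <;> rfl
  | cons x r ih =>
    rw [PySem.List.enumerate_cons, List.foldl_cons, ih, get?_stepB]
    by_cases hxc : c = x
    · rw [if_pos hxc, ← hxc]
      have hm : c ∈ c :: r := List.mem_cons_self
      have hcount : (c :: r).count c = r.count c + 1 := by simp
      have hi : idxN c (c :: r) = 0 := by simp [idxN]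
      cases hd : d.get? c with
      | some v =>
        by_cases hcr : c ∈ r
        · have hl : lastN c (c :: r) = lastN c r + 1 := by simp [lastN, hcr]
          simp [hcr, hm, hl, hcount, Prod.ext_iff] <;> omega
        · have hl : lastN c (c :: r) = 0 := by simp [lastN, hcr]
          have hc0 : r.count c = 0 := List.count_eq_zero_of_not_mem hcr
          simp [hcr, hm, hl, hcount, hc0, Prod.ext_iff] <;> omega
      | none =>
        by_cases hcr : c ∈ r
        · have hl : lastN c (c :: r) = lastN c r + 1 := by simp [lastN, hcr]
          simp [hcr, hm, hl, hcount, hi, Prod.ext_iff] <;> omega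
        · have hl : lastN c (c :: r) = 0 := by simp [lastN, hcr]
          have hc0 : r.count c = 0 := List.count_eq_zero_of_not_mem hcr
          simp [hcr, hm, hl, hcount, hi, hc0, Prod.ext_iff] <;> omega
    · rw [if_neg hxc]
      have hxc' : ¬ x = c := fun h => hxc h.symm
      have hmm : (c ∈ x :: r) ↔ c ∈ r := by simp [List.mem_cons, hxc]
      have hcc : (x :: r).count c = r.count c := by
        simp [List.count_cons, beq_iff_eq, hxc, hxc']
      have hidx : idxN c (x :: r) = idxN c r + 1 := by simp [idxN, hxc']
      cases hd : d.get? c with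
      | some v =>
        by_cases hcr : c ∈ r
        · have hl : lastN c (x :: r) = lastN c r + 1 := by simp [lastN, hcr]
          simp [hcr, hmm.mpr hcr, hl, hcc, Prod.ext_iff] <;> omega
        · have hnm : ¬ c ∈ x :: r := fun h => hcr (hmm.mp h)
          simp [hcr, hnm]
      | none =>
        by_cases hcr : c ∈ r
        · have hl : lastN c (x :: r) = lastN c r + 1 := by simp [lastN, hcr]
          simp [hcr, hmm.mpr hcr, hl, hcc, hidx, Prod.ext_iff] <;> omega
        · have hnm : ¬ c ∈ x :: r := fun h => hcr (hmm.mp h)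
          simp [hcr, hnm]

lemma nodup_keys_foldB (L : List (Int × Char)) (d : PySem.Dict Char (Int × Int × Int))
    (h : d.keys.Nodup) : (L.foldl stepB d).keys.Nodup := by
  induction L generalizing d with
  | nil => exact h
  | cons p L ih =>
    refine ih _ ?_
    unfold stepB PySem.Dict.modify
    split_ifs <;> exact PySem.Dict.nodup_keys_insert _ _ _ h

lemma nodup_keys_lbDict (l : List Char) : (lbDict l).keys.Nodup := by
  exact nodup_keys_foldB _ _ (by simp [PySem.Dict.nodup_keys_empty])

lemma get?_lbDict (l : List Char) (c : Char) :
    (lbDict l).get? c = if c ∈ l then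
        some (((idxN c l : Int), (lastN c l : Int), (l.count c : Int)))
      else none := by
  unfold lbDict
  rw [foldB_get? l 0 PySem.Dict.empty c]
  simp [PySem.Dict.get?_empty]

lemma nodup_lbList (l : List Char) : (lbList l).Nodup := by
  have h1 : (lbList l).Sublist ((lbDict l).items.map (·.1)) :=
    List.Sublist.map _ (List.filter_sublist)
  have h2 : ((lbDict l).items.map (·.1)) = (lbDict l).keys := by
    simp [PySem.Dict.keys]
  rw [h2] at h1
  exact (nodup_keys_lbDict l).sublist h1

lemma mem_lbList (c : Char) (l : List Char) :
    c ∈ lbList l ↔ c ∈ l ∧ idxN c l + l.count c < lastN c l + 1 := by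
  unfold lbList
  simp only [List.mem_map, List.mem_filter]
  constructor
  · rintro ⟨p, ⟨hpm, hpf⟩, hp1⟩
    have hget : (lbDict l).get? p.1 = some p.2 :=
      (PySem.Dict.get?_eq_some_iff_mem_items _ _ _ (nodup_keys_lbDict l)).mpr hpm
    rw [hp1, get?_lbDict] at hget
    by_cases hm : c ∈ l
    · rw [if_pos hm] at hget
      refine ⟨hm, ?_⟩
      have hv := Option.some.inj hget
      rw [← hv] at hpf
      simp only [decide_eq_true_eq] at hpf
      omega
    · rw [if_neg hm] at hget; cases hget
  · rintro ⟨hm, hcond⟩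
    refine ⟨(c, ((idxN c l : Int), (lastN c l : Int), (l.count c : Int))), ⟨?_, ?_⟩, rfl⟩
    · exact (PySem.Dict.get?_eq_some_iff_mem_items _ _ _ (nodup_keys_lbDict l)).mp
        (by rw [get?_lbDict, if_pos hm])
    · simp only [decide_eq_true_eq]; omega

lemma laList_perm_lbList (l : List Char) : (laList l).Perm (lbList l) := by
  rw [List.perm_ext_iff_of_nodup (nodup_laList l) (nodup_lbList l)]
  intro c
  rw [mem_laList, mem_lbList, count_headsFrom]
  simp only [show ((none : Option Char) == some c) = false from rfl]
  by_cases hm : c ∈ l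
  · rw [(runs_iff_span c l).2 hm]
    simp [hm]
  · simp [hm, runsN_eq_zero_of_not_mem hm]

lemma solution_eq (s : String) :
    solution s = (if laList s.toList ≠ [] then
        String.ofList (PySem.List.sorted (laList s.toList) (fun c => c) false) else "N") := by
  unfold solution
  show (if ((s.toList.foldl stepA (PySem.Dict.empty, none)).1.items.foldl
      (fun acc kv => if kv.2 > 1 then acc ++ [kv.1] else acc) ([] : List Char)) ≠ [] then
      String.ofList (PySem.List.sorted ((s.toList.foldl stepA (PySem.Dict.empty, none)).1.items.foldl
        (fun acc kv => if kv.2 > 1 then acc ++ [kv.1] else acc) ([] : List Char)) (fun c => c) false)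
      else "N") = _
  rw [show (List.foldl stepA (PySem.Dict.empty, none) s.toList).1
      = PySem.Dict.counter (headsFrom none s.toList) from by
    rw [foldA_fst, ← PySem.Dict.counter_eq_foldl]]
  have hans : (PySem.Dict.counter (headsFrom none s.toList)).items.foldl
      (fun acc kv => if kv.2 > 1 then acc ++ [kv.1] else acc) ([] : List Char)
      = laList s.toList := by
    simpa [laList] using PySem.List.foldl_append_if
      (l := (PySem.Dict.counter (headsFrom none s.toList)).items)
      (p := fun p => p.2 > 1) (f := (·.1)) (acc := ([] : List Char))
  rw [hans]

lemma solution_alt_eq (s : String) :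
    solution_alt s = (if lbList s.toList ≠ [] then
        String.ofList (PySem.List.sorted (lbList s.toList) (fun c => c) false) else "N") := by
  unfold solution_alt
  show (if PySem.List.sorted (lbList s.toList) (fun c => c) false ≠ [] then
      String.ofList (PySem.List.sorted (lbList s.toList) (fun c => c) false) else "N") = _
  rcases eq_or_ne (lbList s.toList) [] with h | h
  · simp [h, PySem.List.sorted_eq_nil_iff]
  · have hs : PySem.List.sorted (lbList s.toList) (fun c => c) false ≠ [] := by
      simp [PySem.List.sorted_eq_nil_iff, h]
    simp [h, hs]

-- ===== VERDICT =====
theorem solution_spec : Claim_equal_solution := by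
  intro s _
  unfold Spec_solution
  rw [solution_eq, solution_alt_eq]
  have hperm := laList_perm_lbList s.toList
  have hsort : PySem.List.sorted (laList s.toList) (fun c => c) false
      = PySem.List.sorted (lbList s.toList) (fun c => c) false :=
    PySem.List.sorted_eq_sorted_of_perm _ _ _ (fun a b h => h) hperm
  rcases eq_or_ne (laList s.toList) [] with h | h
  · have h2 : lbList s.toList = [] := by
      rw [← List.length_eq_zero_iff, ← hperm.length_eq, h]
      rfl
    simp [h, h2]
  · have h2 : lbList s.toList ≠ [] := by
      intro hh
      apply h
      rw [← List.length_eq_zero_iff, hperm.length_eq, hh]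
      rfl
    simp [h, h2, hsort]
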